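-- pv_equiv track=rewrite | github.com/DhruvBO/BigOh_Competitve_Coding | BootcampProgTestWeek1/p_2.py | interleaving
-- ===== SOURCE A (Python) =====
-- def interleaving(str1, str2):
--     firstStr = str1
--     secondStr = str2
--     interLeavingArr = []
--     for k in range(2):
--         if  k > 0:
--             firstStr = str2
--             secondStr = str1
--
--         # pattern 1
--         interLeavingArr.append((firstStr + secondStr))
--
--         # pattern 2
--         subStr = ""
--         i, j = 0, 0
--         while i < len(firstStr):
--             subStr += firstStr[i]
--             if j < len(secondStr):
--                 subStr += secondStr[j]
--                 j+=1
--             i+=1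
--         interLeavingArr.append(subStr)
--
--         # pattern 3
--         subStr = ""
--         i, j = 0, 0
--         while i < len(firstStr):
--             subStr += firstStr[i]
--
--             while j < len(secondStr):
--                 subStr += secondStr[j]
--                 j+=1
--             i+= 1
--
--         interLeavingArr.append(subStr)
--
--
--     return interLeavingArr
-- ===== SOURCE B (Python) =====
-- def interleaving(str1, str2):
--     out = []
--     for first, second in ((str1, str2), (str2, str1)):
--         out.append(first + second)
--         out.append(''.join(a + b for a, b in zip(first, second)) + first[len(second):])
--         out.append(first[:1] + second + first[1:] if first else '')
--     return out
-- ===== Notes on version B (the rewrite author's own statement) =====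
-- stated objective: faster
-- what changed: Replaced A's index-juggling while-loops for patterns 2 and 3 with closed forms: zip-join plus a tail slice for the alternating pattern, and a slice expression first[:1]+second+first[1:] for the insert-after-first-char pattern.
import Mathlib
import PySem

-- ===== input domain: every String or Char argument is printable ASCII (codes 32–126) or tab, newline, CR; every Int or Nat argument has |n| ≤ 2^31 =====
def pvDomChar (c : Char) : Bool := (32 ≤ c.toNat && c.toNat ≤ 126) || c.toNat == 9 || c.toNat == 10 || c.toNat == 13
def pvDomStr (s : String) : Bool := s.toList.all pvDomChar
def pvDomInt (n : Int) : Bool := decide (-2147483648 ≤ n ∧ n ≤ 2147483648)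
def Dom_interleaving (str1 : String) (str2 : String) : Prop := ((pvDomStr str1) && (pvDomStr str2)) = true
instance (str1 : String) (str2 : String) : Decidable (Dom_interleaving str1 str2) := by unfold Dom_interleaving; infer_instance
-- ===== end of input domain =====

-- B replaces A's while-loop index juggling for patterns 2 and 3 with zip/slice closed forms (objective: idiomatic).

-- ===== PORT A =====
-- pattern-2 while loop: i walks firstStr, j walks secondStr while it lasts (state = remaining suffixes)
def pvP2loop : List Char → List Char → List Char
  | [], _ => []
  | a :: f, [] => a :: pvP2loop f []
  | a :: f, b :: s => a :: b :: pvP2loop f s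

-- pattern-3 nested loops: outer walks firstStr, inner drains the rest of secondStr (j persists)
def pvP3loop : List Char → List Char → List Char
  | [], _ => []
  | a :: f, s => a :: (s ++ pvP3loop f [])

-- the k-loop body with (firstStr, secondStr) already swapped for k = 1
def pvAPatterns (f s : String) : List String :=
  [f ++ s, String.mk (pvP2loop f.toList s.toList), String.mk (pvP3loop f.toList s.toList)]

def interleaving (str1 : String) (str2 : String) : List String :=
  pvAPatterns str1 str2 ++ pvAPatterns str2 str1

-- ===== PORT B =====
def pvBPatterns (f s : String) : List String :=
  let fl := f.toList
  let sl := s.toList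
  [f ++ s,
   String.mk ((fl.zip sl).flatMap (fun p => [p.1, p.2]) ++ fl.drop sl.length),
   if fl = [] then "" else String.mk (fl.take 1 ++ sl ++ fl.drop 1)]

def interleaving_alt (str1 : String) (str2 : String) : List String :=
  pvBPatterns str1 str2 ++ pvBPatterns str2 str1

-- ===== PRECONDITION & SPEC =====
def Spec_interleaving (str1 : String) (str2 : String) (out : List String) : Prop := out = interleaving_alt str1 str2
instance (str1 : String) (str2 : String) (out : List String) : Decidable (Spec_interleaving str1 str2 out) := by unfold Spec_interleaving; infer_instance

-- ===== CLAIM (what is proved, stated in full; the proofs are below) =====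
def Claim_equal_interleaving : Prop := ∀ (str1 : String) (str2 : String), Dom_interleaving str1 str2 → Spec_interleaving str1 str2 (interleaving str1 str2)

-- ===== LEMMAS AND PROOFS =====
theorem pvP2loop_eq (f s : List Char) :
    pvP2loop f s = (f.zip s).flatMap (fun p => [p.1, p.2]) ++ f.drop s.length := by
  induction f generalizing s with
  | nil => simp [pvP2loop]
  | cons a f ih =>
    cases s with
    | nil => simp [pvP2loop, ih]
    | cons b s => simp [pvP2loop, ih]

theorem pvP3loop_nil (f : List Char) : pvP3loop f [] = f := by
  induction f with
  | nil => rfl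
  | cons a f ih => simp [pvP3loop, ih]

theorem pvP3loop_eq (f s : List Char) :
    pvP3loop f s = if f = [] then [] else f.take 1 ++ s ++ f.drop 1 := by
  cases f with
  | nil => rfl
  | cons a f => simp [pvP3loop, pvP3loop_nil]

theorem pvPatterns_eq (f s : String) : pvAPatterns f s = pvBPatterns f s := by
  simp only [pvAPatterns, pvBPatterns, pvP2loop_eq, pvP3loop_eq]
  split <;> simp_all <;> rfl

-- ===== VERDICT (by name: the statement is the Claim_ definition above) =====
theorem interleaving_spec : Claim_equal_interleaving := by
  intro str1 str2 _
  unfold Spec_interleaving interleaving interleaving_alt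
  rw [pvPatterns_eq, pvPatterns_eq]
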